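-- pv_equiv track=rewrite | github.com/Jonnyffeler/OutdoorSceneGraph | utils/utils_subscenes.py | get_edges_for_scene
-- ===== SOURCE A (Python) =====
-- def get_edges_for_scene(edges, scene_dict, id_root_edges):
--     edges_in_scene = []
--     object_ids = list(scene_dict.keys())
--     split_id = len(edges)
--     find_split = True
--     for i, edge in enumerate(edges):
--         append_edge = True
--         for edge_id in edge:
--             if edge_id not in object_ids:
--                 append_edge = False
--                 break
--         if append_edge:
--             if find_split and i >= id_root_edges:# first time we have 'part of' edges
--                 split_id = len(edges_in_scene)
--                 find_split = False
--             edges_in_scene.append(edge)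
--
--     return edges_in_scene, edges_in_scene[:split_id], edges_in_scene[split_id:]
-- ===== SOURCE B (Python) =====
-- def get_edges_for_scene(edges, scene_dict, id_root_edges):
--     first = [e for i, e in enumerate(edges)
--              if i < id_root_edges and all(x in scene_dict for x in e)]
--     second = [e for i, e in enumerate(edges)
--               if i >= id_root_edges and all(x in scene_dict for x in e)]
--     return first + second, first, second
-- ===== Notes on version B (the rewrite author's own statement) =====
-- stated objective: faster
-- what changed: Replaces the stateful single pass with a find_split flag, a list(scene_dict.keys()) linear membership scan and len(edges) sentinel plus end slicing by two direct index-partitioned filters over enumerate(edges) that test membership against the dict itself (O(1) per lookup) and concatenate for the full result.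
import Mathlib
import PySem

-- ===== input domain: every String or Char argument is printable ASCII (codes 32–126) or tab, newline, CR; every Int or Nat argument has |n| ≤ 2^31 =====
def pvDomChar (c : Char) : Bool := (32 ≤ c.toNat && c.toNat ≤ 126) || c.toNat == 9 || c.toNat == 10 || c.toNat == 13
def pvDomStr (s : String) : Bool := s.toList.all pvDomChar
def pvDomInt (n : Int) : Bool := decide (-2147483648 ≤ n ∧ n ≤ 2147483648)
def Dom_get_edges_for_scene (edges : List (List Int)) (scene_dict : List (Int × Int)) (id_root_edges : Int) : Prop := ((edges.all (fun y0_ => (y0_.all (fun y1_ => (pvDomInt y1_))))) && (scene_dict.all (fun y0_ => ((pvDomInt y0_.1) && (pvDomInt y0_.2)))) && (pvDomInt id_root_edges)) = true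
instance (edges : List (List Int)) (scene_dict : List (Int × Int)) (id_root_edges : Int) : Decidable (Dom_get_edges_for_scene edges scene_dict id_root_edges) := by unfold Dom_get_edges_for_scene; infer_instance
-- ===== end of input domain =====

-- B replaces A's stateful pass (find_split flag, list-of-keys membership scan, len(edges)
-- sentinel, end slicing) by two direct index-partitioned filters testing membership against
-- the dict; objective: faster (measured).

-- ===== PORT A =====
-- inner 'for edge_id in edge' loop with break
def pvAllInA (object_ids : List Int) : List Int → Bool
  | [] => true
  | x :: rest => if object_ids.contains x = false then false else pvAllInA object_ids rest

-- body of the 'for i, edge in enumerate(edges)' loop; state = (edges_in_scene, split_id, find_split)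
def pvStepA (object_ids : List Int) (id_root_edges : Int)
    (st : List (List Int) × Int × Bool) (p : Int × List Int) :
    List (List Int) × Int × Bool :=
  let append_edge := pvAllInA object_ids p.2
  if append_edge then
    if st.2.2 && decide (p.1 ≥ id_root_edges) then
      (st.1 ++ [p.2], (st.1.length : Int), false)
    else
      (st.1 ++ [p.2], st.2.1, st.2.2)
  else st

def get_edges_for_scene (edges : List (List Int)) (scene_dict : List (Int × Int)) (id_root_edges : Int) : List (List Int) × List (List Int) × List (List Int) :=
  let object_ids := (PySem.Dict.ofList scene_dict).keys
  let st := (PySem.List.enumerate edges 0).foldl (pvStepA object_ids id_root_edges)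
      (([] : List (List Int)), (edges.length : Int), true)
  (st.1, PySem.List.slice st.1 none (some st.2.1), PySem.List.slice st.1 (some st.2.1) none)

-- ===== PORT B =====
def get_edges_for_scene_alt (edges : List (List Int)) (scene_dict : List (Int × Int)) (id_root_edges : Int) : List (List Int) × List (List Int) × List (List Int) :=
  let d := PySem.Dict.ofList scene_dict
  let first := ((PySem.List.enumerate edges 0).filter
      (fun p => decide (p.1 < id_root_edges) && p.2.all d.contains)).map (·.2)
  let second := ((PySem.List.enumerate edges 0).filter
      (fun p => decide (p.1 ≥ id_root_edges) && p.2.all d.contains)).map (·.2)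
  (first ++ second, first, second)

-- ===== PRECONDITION & SPEC =====
def Spec_get_edges_for_scene (edges : List (List Int)) (scene_dict : List (Int × Int)) (id_root_edges : Int) (out : List (List Int) × List (List Int) × List (List Int)) : Prop := out = get_edges_for_scene_alt edges scene_dict id_root_edges
instance (edges : List (List Int)) (scene_dict : List (Int × Int)) (id_root_edges : Int) (out : List (List Int) × List (List Int) × List (List Int)) : Decidable (Spec_get_edges_for_scene edges scene_dict id_root_edges out) := by unfold Spec_get_edges_for_scene; infer_instance

-- ===== CLAIM (what is proved, stated in full; the proofs are below) =====
def Claim_equal_get_edges_for_scene : Prop := ∀ (edges : List (List Int)) (scene_dict : List (Int × Int)) (id_root_edges : Int), Dom_get_edges_for_scene edges scene_dict id_root_edges → Spec_get_edges_for_scene edges scene_dict id_root_edges (get_edges_for_scene edges scene_dict id_root_edges)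

-- ===== LEMMAS AND PROOFS =====

theorem pvAllInA_keys (scene_dict : List (Int × Int)) (e : List Int) :
    pvAllInA (PySem.Dict.ofList scene_dict).keys e
      = e.all (PySem.Dict.ofList scene_dict).contains := by
  have hx : ∀ x : Int, (PySem.Dict.ofList scene_dict).keys.contains x
      = (PySem.Dict.ofList scene_dict).contains x := by
    intro x
    rw [Bool.eq_iff_iff]
    simp [List.contains_iff_mem, PySem.Dict.contains_iff_mem_keys]
  induction e with
  | nil => rfl
  | cons x rest ih =>
    cases hcx : (PySem.Dict.ofList scene_dict).contains x <;>
      simp only [pvAllInA, hx, hcx, ih, List.all_cons, Bool.false_and, Bool.true_and,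
        if_true, if_false, Bool.true_eq_false]

-- find_split = false phase: indices no longer matter, every kept edge is appended
theorem pvLoop_false (oids : List Int) (root : Int) (l : List (List Int)) :
    ∀ (s : Int) (acc : List (List Int)) (v : Int),
    (PySem.List.enumerate l s).foldl (pvStepA oids root) (acc, v, false)
      = (acc ++ l.filter (pvAllInA oids), v, false) := by
  induction l with
  | nil => intro s acc v; simp [PySem.List.enumerate_nil]
  | cons x rest ih =>
    intro s acc v
    rw [PySem.List.enumerate_cons]
    simp only [List.foldl_cons, List.filter_cons]
    by_cases hk : pvAllInA oids x = true
    · simp [pvStepA, hk, ih]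
    · simp only [Bool.not_eq_true] at hk
      simp [pvStepA, hk, ih]

-- once every remaining index is ≥ root, the 'ge' filter keeps exactly the kept edges …
theorem filter_ge_all (d : PySem.Dict Int Int) (root : Int) (l : List (List Int)) :
    ∀ s : Int, root ≤ s →
    ((PySem.List.enumerate l s).filter
        (fun p => decide (p.1 ≥ root) && p.2.all d.contains)).map (·.2)
      = l.filter (fun e => e.all d.contains) := by
  induction l with
  | nil => intro s _; simp [PySem.List.enumerate_nil]
  | cons x rest ih =>
    intro s hs
    rw [PySem.List.enumerate_cons]
    simp only [List.filter_cons]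
    by_cases hk : (x.all d.contains) = true
    · simp [hk, ge_iff_le, hs, ih (s+1) (by omega)]
    · simp only [Bool.not_eq_true] at hk
      simp [hk, ge_iff_le, hs, ih (s+1) (by omega)]

-- … and the 'lt' filter keeps nothing
theorem filter_lt_nil (d : PySem.Dict Int Int) (root : Int) (l : List (List Int)) :
    ∀ s : Int, root ≤ s →
    ((PySem.List.enumerate l s).filter
        (fun p => decide (p.1 < root) && p.2.all d.contains)).map (·.2) = [] := by
  induction l with
  | nil => intro s _; simp [PySem.List.enumerate_nil]
  | cons x rest ih =>
    intro s hs
    rw [PySem.List.enumerate_cons]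
    simp only [List.filter_cons]
    have : ¬ (s < root) := by omega
    simp [this, ih (s+1) (by omega)]

-- find_split = true phase starting at an index s ≥ root
theorem pvLoop_true_ge (scene_dict : List (Int × Int)) (root : Int) (l : List (List Int)) :
    ∀ (s : Int) (acc : List (List Int)) (v : Int), root ≤ s →
    (PySem.List.enumerate l s).foldl
        (pvStepA (PySem.Dict.ofList scene_dict).keys root) (acc, v, true)
      = (if l.filter (pvAllInA (PySem.Dict.ofList scene_dict).keys) = []
         then (acc, v, true)
         else (acc ++ l.filter (pvAllInA (PySem.Dict.ofList scene_dict).keys),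
               (acc.length : Int), false)) := by
  induction l with
  | nil => intro s acc v _; simp [PySem.List.enumerate_nil]
  | cons x rest ih =>
    intro s acc v hs
    rw [PySem.List.enumerate_cons]
    simp only [List.foldl_cons, List.filter_cons]
    by_cases hk : pvAllInA (PySem.Dict.ofList scene_dict).keys x = true
    · simp only [hk]
      have hstep : pvStepA (PySem.Dict.ofList scene_dict).keys root (acc, v, true) (s, x)
          = (acc ++ [x], (acc.length : Int), false) := by
        simp [pvStepA, hk, ge_iff_le, hs]
      rw [hstep, pvLoop_false]
      simp
    · simp only [Bool.not_eq_true] at hk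
      have hstep : pvStepA (PySem.Dict.ofList scene_dict).keys root (acc, v, true) (s, x)
          = (acc, v, true) := by simp [pvStepA, hk]
      rw [hstep, ih (s+1) acc v (by omega)]
      simp [hk]

-- find_split = true phase, general start index
theorem pvLoop_true (scene_dict : List (Int × Int)) (root : Int) (l : List (List Int)) :
    ∀ (s : Int) (acc : List (List Int)) (v : Int),
    (PySem.List.enumerate l s).foldl
        (pvStepA (PySem.Dict.ofList scene_dict).keys root) (acc, v, true)
      = (if ((PySem.List.enumerate l s).filter
              (fun p => decide (p.1 ≥ root) && p.2.all (PySem.Dict.ofList scene_dict).contains)).map (·.2) = []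
         then (acc ++ ((PySem.List.enumerate l s).filter
              (fun p => decide (p.1 < root) && p.2.all (PySem.Dict.ofList scene_dict).contains)).map (·.2), v, true)
         else (acc ++ ((PySem.List.enumerate l s).filter
              (fun p => decide (p.1 < root) && p.2.all (PySem.Dict.ofList scene_dict).contains)).map (·.2)
                   ++ ((PySem.List.enumerate l s).filter
              (fun p => decide (p.1 ≥ root) && p.2.all (PySem.Dict.ofList scene_dict).contains)).map (·.2),
               ((acc ++ ((PySem.List.enumerate l s).filter
              (fun p => decide (p.1 < root) && p.2.all (PySem.Dict.ofList scene_dict).contains)).map (·.2)).length : Int),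
               false)) := by
  induction l with
  | nil => intro s acc v; simp [PySem.List.enumerate_nil]
  | cons x rest ih =>
    intro s acc v
    by_cases hs : root ≤ s
    · -- all indices from s on are ≥ root
      rw [pvLoop_true_ge scene_dict root (x :: rest) s acc v hs]
      have hA := filter_lt_nil (PySem.Dict.ofList scene_dict) root (x :: rest) s hs
      have hB := filter_ge_all (PySem.Dict.ofList scene_dict) root (x :: rest) s hs
      simp only [hA, hB]
      have hfil : (x :: rest).filter (pvAllInA (PySem.Dict.ofList scene_dict).keys)
          = (x :: rest).filter (fun e => e.all (PySem.Dict.ofList scene_dict).contains) := by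
        apply List.filter_congr; intro e _; exact pvAllInA_keys scene_dict e
      rw [hfil]
      split <;> simp
    · rw [not_le] at hs
      rw [PySem.List.enumerate_cons]
      simp only [List.foldl_cons, List.filter_cons]
      by_cases hk : (x.all (PySem.Dict.ofList scene_dict).contains) = true
      · have hk' : pvAllInA (PySem.Dict.ofList scene_dict).keys x = true := by
          rw [pvAllInA_keys]; exact hk
        have hstep : pvStepA (PySem.Dict.ofList scene_dict).keys root (acc, v, true) (s, x)
            = (acc ++ [x], v, true) := by
          simp [pvStepA, hk', ge_iff_le]; omega
        rw [hstep, ih (s+1) (acc ++ [x]) v]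
        have c1 : (decide (s ≥ root) && x.all (PySem.Dict.ofList scene_dict).contains) = false := by
          simp [ge_iff_le]; omega
        have c2 : (decide (s < root) && x.all (PySem.Dict.ofList scene_dict).contains) = true := by
          simp [hk]; omega
        simp only [c1, c2, if_true, if_false, Bool.false_eq_true, List.map_cons]
        split <;> simp
      · simp only [Bool.not_eq_true] at hk
        have hk' : pvAllInA (PySem.Dict.ofList scene_dict).keys x = false := by
          rw [pvAllInA_keys]; exact hk
        have hstep : pvStepA (PySem.Dict.ofList scene_dict).keys root (acc, v, true) (s, x)
            = (acc, v, true) := by simp [pvStepA, hk']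
        rw [hstep, ih (s+1) acc v]
        have c1 : (decide (s ≥ root) && x.all (PySem.Dict.ofList scene_dict).contains) = false := by
          simp [hk]
        have c2 : (decide (s < root) && x.all (PySem.Dict.ofList scene_dict).contains) = false := by
          simp [hk]
        simp only [c1, c2, if_false, Bool.false_eq_true]

theorem lenA_le (d : PySem.Dict Int Int) (root : Int) (edges : List (List Int)) :
    (((PySem.List.enumerate edges 0).filter
        (fun p => decide (p.1 < root) && p.2.all d.contains)).map (·.2)).length
      ≤ edges.length := by
  calc _ ≤ (PySem.List.enumerate edges 0).length := by
            simp only [List.length_map]; exact List.length_filter_le _ _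
    _ = edges.length := PySem.List.length_enumerate edges 0

-- ===== VERDICT (by name: the statement is the Claim_ definition above) =====
theorem get_edges_for_scene_spec : Claim_equal_get_edges_for_scene := by
  intro edges scene_dict root _
  simp only [Spec_get_edges_for_scene, get_edges_for_scene, get_edges_for_scene_alt]
  rw [pvLoop_true scene_dict root edges 0 [] (edges.length : Int)]
  have hAlen := lenA_le (PySem.Dict.ofList scene_dict) root edges
  by_cases hBnil : ((PySem.List.enumerate edges 0).filter
      (fun p => decide (p.1 ≥ root) && p.2.all (PySem.Dict.ofList scene_dict).contains)).map (·.2) = []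
  · rw [if_pos hBnil, hBnil]
    simp only [List.nil_append, List.append_nil]
    rw [PySem.List.slice_to _ (Int.natCast_nonneg _),
        PySem.List.slice_from _ (Int.natCast_nonneg _)]
    simp only [Int.toNat_natCast]
    rw [List.take_of_length_le hAlen, List.drop_eq_nil_of_le hAlen]
  · rw [if_neg hBnil]
    simp only [List.nil_append]
    rw [PySem.List.slice_to _ (Int.natCast_nonneg _),
        PySem.List.slice_from _ (Int.natCast_nonneg _)]
    simp only [Int.toNat_natCast]
    rw [List.take_left, List.drop_left]
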